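-- pv_equiv track=rewrite | github.com/chrysa/container-webview | scripts/quality_gate.py | _parse_passed_tests
-- ===== SOURCE A (Python) =====
-- def _parse_passed_tests(output: str) -> int:
--     for line in output.split('\n'):
--         if 'passed' in line:
--             parts = line.split()
--             for i, part in enumerate(parts):
--                 if 'passed' in part and i > 0:
--                     try:
--                         return int(parts[i-1])
--                     except (ValueError, IndexError):
--                         continue
--     return 0
-- ===== SOURCE B (Python) =====
-- def _parse_passed_tests(output: str) -> int:
--     prev = None   # previous completed token on the current line, if any
--     cur = []      # characters of the token currently being read
--     for ch in output + '\n':      # trailing '\n' flushes the final token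
--         if ch.isspace():
--             if cur:
--                 tok = ''.join(cur)
--                 if prev is not None and 'passed' in tok:
--                     try:
--                         return int(prev)
--                     except ValueError:
--                         pass
--                 prev = tok
--                 cur = []
--             if ch == '\n':
--                 prev = None
--         else:
--             cur.append(ch)
--     return 0
-- ===== Notes on version B (the rewrite author's own statement) =====
-- stated objective: alternative
-- what changed: A splits the output into lines and each line into a token list, then runs a nested indexed scan with parts[i-1] lookups; B never splits at all: it is a single streaming pass over the characters of output+'\n' driving a small automaton whose registers are the token being read and the previous token of the current line (reset at newline), trying int on the previous token whenever a completed token contains 'passed'.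
import Mathlib
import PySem

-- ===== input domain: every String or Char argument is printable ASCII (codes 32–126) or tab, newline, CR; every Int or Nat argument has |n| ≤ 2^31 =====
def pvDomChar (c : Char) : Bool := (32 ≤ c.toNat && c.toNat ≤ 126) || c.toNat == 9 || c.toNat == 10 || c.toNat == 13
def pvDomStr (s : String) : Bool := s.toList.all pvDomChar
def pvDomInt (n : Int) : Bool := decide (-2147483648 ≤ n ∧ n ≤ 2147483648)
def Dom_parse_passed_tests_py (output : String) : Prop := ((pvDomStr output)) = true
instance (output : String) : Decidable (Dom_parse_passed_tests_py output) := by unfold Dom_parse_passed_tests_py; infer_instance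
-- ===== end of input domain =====

-- B replaces A's split-into-lines-then-split-into-tokens nested scans by one streaming pass
-- over the characters, a two-register automaton (current token, previous token of the line)
-- with no splitting at all (objective: alternative).

-- ===== PORT A =====
-- inner loop: 'for i, part in enumerate(parts): if "passed" in part and i > 0: try: return int(parts[i-1]) except: continue'
def pvAinner (parts : List String) : List String → Nat → Option Int
  | [], _ => none
  | p :: rest, i =>
    if PySem.Str.isIn "passed" p && decide (i > 0) then
      match PySem.List.pyGet? parts ((i : Int) - 1) with
      | some prev =>
        match PySem.Int.ofStr? prev with
        | some v => some v                    -- return int(parts[i-1])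
        | none => pvAinner parts rest (i + 1) -- ValueError → continue
      | none => pvAinner parts rest (i + 1)   -- IndexError → continue (unreachable: i > 0)
    else pvAinner parts rest (i + 1)

-- one iteration of the outer loop: its body is guarded by 'if "passed" in line'
def pvAline (line : String) : Option Int :=
  if PySem.Str.isIn "passed" line then
    pvAinner (PySem.Str.split₀ line) (PySem.Str.split₀ line) 0
  else none

-- outer loop over output.split('\n'); 'return 0' after it
def pvAlines : List String → Int
  | [] => 0
  | l :: rest =>
    match pvAline l with
    | some v => v
    | none => pvAlines rest

def parse_passed_tests_py (output : String) : Int :=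
  pvAlines ((PySem.Str.split? output "\n").getD [])  -- sep "\n" ≠ "" so split? is always some

-- ===== PORT B =====
-- the for-loop: state (prev, cur); 'cur' holds the token's characters in order, so the
-- ''.join(cur) of Source B is 'cur' itself
def pvBgo : List Char → Option (List Char) → List Char → Int
  | [], _, _ => 0                                       -- loop ended: return 0
  | ch :: rest, prev, cur =>
    if PySem.Chars.strIsspace [ch] then                 -- ch.isspace()
      if cur.isEmpty then
        if ch = '\n' then pvBgo rest none [] else pvBgo rest prev []
      else
        match prev with
        | some p =>
          if PySem.Chars.isIn ['p','a','s','s','e','d'] cur then   -- 'passed' in tok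
            match PySem.Int.ofChars? p with
            | some v => v                               -- return int(prev)
            | none =>                                   -- ValueError → fall through
              if ch = '\n' then pvBgo rest none [] else pvBgo rest (some cur) []
          else if ch = '\n' then pvBgo rest none [] else pvBgo rest (some cur) []
        | none => if ch = '\n' then pvBgo rest none [] else pvBgo rest (some cur) []
    else pvBgo rest prev (cur ++ [ch])                  -- cur.append(ch)

def parse_passed_tests_py_alt (output : String) : Int :=
  pvBgo (output.toList ++ ['\n']) none []               -- for ch in output + '\n'

-- ===== PRECONDITION & SPEC =====
def Spec_parse_passed_tests_py (output : String) (out : Int) : Prop := out = parse_passed_tests_py_alt output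
instance (output : String) (out : Int) : Decidable (Spec_parse_passed_tests_py output out) := by unfold Spec_parse_passed_tests_py; infer_instance

-- ===== CLAIM (what is proved, stated in full; the proofs are below) =====
def Claim_equal_parse_passed_tests_py : Prop := ∀ (output : String), Dom_parse_passed_tests_py output → Spec_parse_passed_tests_py output (parse_passed_tests_py output)

-- ===== LEMMAS AND PROOFS =====

-- -------- proof-side vocabulary --------
-- the chars of "passed"
def pvP : List Char := ['p','a','s','s','e','d']

-- the candidate parses of a token list: one per adjacent pair whose second member contains "passed"
def pvCandC (m : List (List Char)) : List (Option Int) :=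
  ((m.zip m.tail).filter (fun pt => PySem.Chars.isIn pvP pt.2)).map (fun pt => PySem.Int.ofChars? pt.1)

-- tokens of a line suffix l, given the pending (partially read) token cur
def pvToks (l cur : List Char) : List (List Char) := PySem.Chars.split₀.go l cur.reverse []

def pvOptL : Option (List Char) → List (List Char)
  | none => []
  | some p => [p]

-- the lines of a character list (split on '\n'; always nonempty)
def pvLinesC : List Char → List (List Char)
  | [] => [[]]
  | c :: rest => if c = '\n' then [] :: pvLinesC rest else (pvLinesC rest).modifyHead (c :: ·)

-- what pvBgo computes, expressed over the line decomposition
def pvAns : List (List Char) → Option (List Char) → List Char → Int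
  | [], _, _ => 0
  | L :: Ls, prev, cur =>
    (((pvCandC (pvOptL prev ++ pvToks L cur) ++
        Ls.flatMap (fun l => pvCandC (PySem.Chars.split₀ l))).filterMap id).head?).getD 0

-- unfolding equations for pvBgo (the compiled match refuses plain 'rw [pvBgo]')
theorem pvBgo_cons (ch : Char) (rest : List Char) (prev : Option (List Char)) (cur : List Char) :
    pvBgo (ch :: rest) prev cur =
      (if PySem.Chars.strIsspace [ch] then
        if cur.isEmpty then
          if ch = '\n' then pvBgo rest none [] else pvBgo rest prev []
        else
          match prev with
          | some p =>
            if PySem.Chars.isIn pvP cur then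
              match PySem.Int.ofChars? p with
              | some v => v
              | none =>
                if ch = '\n' then pvBgo rest none [] else pvBgo rest (some cur) []
            else if ch = '\n' then pvBgo rest none [] else pvBgo rest (some cur) []
          | none => if ch = '\n' then pvBgo rest none [] else pvBgo rest (some cur) []
      else pvBgo rest prev (cur ++ [ch])) := rfl

-- -------- A-side lemmas (A = first successful candidate, per line) --------

-- invariant of split₀'s worker: cur.reverse ++ rest is the unread infix, acc the tokens found so far
theorem pvGo_inv (rest : List Char) : ∀ (cur : List Char) (acc : List (List Char)) (full : List Char),
    (cur.reverse ++ rest <:+: full) → (∀ a ∈ acc, a <:+: full) →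
    ∀ t ∈ PySem.Chars.split₀.go rest cur acc, t <:+: full := by
  induction rest with
  | nil =>
    intro cur acc full hcur hacc t ht
    simp only [PySem.Chars.split₀.go] at ht
    split at ht
    · exact hacc t (by simpa using ht)
    · simp only [List.reverse_cons, List.mem_append, List.mem_reverse, List.mem_singleton] at ht
      rcases ht with h | rfl
      · exact hacc t h
      · simpa using hcur
  | cons c rest ih =>
    intro cur acc full hcur hacc t ht
    simp only [PySem.Chars.split₀.go] at ht
    split at ht
    · split at ht
      · exact ih [] acc full (List.IsInfix.trans ⟨cur.reverse ++ [c], [], by simp⟩ hcur) hacc t ht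
      · refine ih [] (cur.reverse :: acc) full (List.IsInfix.trans ⟨cur.reverse ++ [c], [], by simp⟩ hcur) ?_ t ht
        intro a ha
        rcases List.mem_cons.mp ha with rfl | ha
        · exact List.IsInfix.trans ⟨[], c :: rest, by simp⟩ hcur
        · exact hacc a ha
    · refine ih (c :: cur) acc full ?_ hacc t ht
      simpa using hcur

-- every whitespace-split token is an infix of the string
theorem pvSplit₀_infix (cs tok : List Char) (h : tok ∈ PySem.Chars.split₀ cs) : tok <:+: cs :=
  pvGo_inv cs [] [] cs (by simp) (by simp) tok h

-- A's per-line candidate list on String tokens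
def pvCand (m : List String) : List (Option Int) :=
  ((m.zip m.tail).filter (fun pt => PySem.Str.isIn "passed" pt.2)).map (fun pt => PySem.Int.ofStr? pt.1)

-- A's inner scan from index j+1 over the suffix m.tail (m = parts.drop j) is the
-- first-non-none read-out of the adjacent-pair candidates of m
theorem pvInner_eq (parts : List String) : ∀ (m : List String) (j : Nat), parts.drop j = m →
    pvAinner parts m.tail (j + 1) = ((pvCand m).filterMap id).head? := by
  intro m
  induction m with
  | nil => intro j h; simp [pvAinner, pvCand]
  | cons p t ih =>
    intro j h
    match t, ih with
    | [], _ => simp [pvAinner, pvCand]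
    | q :: t', ih =>
      have hdrop : parts.drop (j + 1) = q :: t' := by
        rw [← List.tail_drop, h]; rfl
      have hget : PySem.List.pyGet? parts ((((j : Nat) + 1 : Nat) : Int) - 1) = some p := by
        have hc : ((((j : Nat) + 1 : Nat) : Int) - 1) = ((j : Nat) : Int) := by push_cast; ring
        have hj : parts[j]? = some p := by
          rw [← Nat.add_zero j, ← List.getElem?_drop, h]; rfl
        rw [hc, PySem.List.pyGet?_natCast, hj]
      have hrec := ih (j + 1) hdrop
      simp only [List.tail_cons] at hrec
      show pvAinner parts (q :: t') (j + 1) = _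
      by_cases hq : PySem.Str.isIn "passed" q = true
      · have hqc : PySem.Chars.isIn ['p','a','s','s','e','d'] q.toList = true := by
          simpa [PySem.Str.isIn] using hq
        rw [pvAinner, if_pos (by rw [hq]; simp), hget]
        have hcand : pvCand (p :: q :: t') = PySem.Int.ofStr? p :: pvCand (q :: t') := by
          simp [pvCand, hqc]
        cases hof : PySem.Int.ofStr? p with
        | some v => simp [hcand, hof]
        | none => rw [hcand]; simp only [hof, List.filterMap_cons]; exact hrec
      · have hq' : PySem.Str.isIn "passed" q = false := eq_false_of_ne_true hq
        have hqc' : PySem.Chars.isIn ['p','a','s','s','e','d'] q.toList = false := by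
          simpa [PySem.Str.isIn] using hq'
        rw [pvAinner, if_neg (by rw [hq']; simp)]
        rw [(by simp [pvCand, hqc'] : pvCand (p :: q :: t') = pvCand (q :: t'))]
        exact hrec

-- one outer-loop iteration of A equals the candidates of that line (the 'passed' in line
-- guard is redundant: a token containing 'passed' is an infix of the line)
theorem pvLine_eq (line : String) :
    pvAline line = ((pvCand (PySem.Str.split₀ line)).filterMap id).head? := by
  unfold pvAline
  by_cases hl : PySem.Str.isIn "passed" line = true
  · rw [if_pos hl]
    have key := pvInner_eq (PySem.Str.split₀ line) (PySem.Str.split₀ line) 0 (by simp)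
    cases hparts : PySem.Str.split₀ line with
    | nil => simp [pvAinner, pvCand]
    | cons p t =>
      rw [hparts] at key
      rw [pvAinner, if_neg (by simp)]
      simpa using key
  · rw [if_neg hl]
    have hnone : ∀ pt ∈ (PySem.Str.split₀ line).zip (PySem.Str.split₀ line).tail,
        PySem.Str.isIn "passed" pt.2 = false := by
      intro pt hpt
      by_contra hc
      have htrue : PySem.Str.isIn "passed" pt.2 = true := by
        cases hx : PySem.Str.isIn "passed" pt.2 with
        | true => rfl
        | false => exact absurd hx hc
      have htok : pt.2 ∈ PySem.Str.split₀ line :=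
        List.mem_of_mem_tail (List.of_mem_zip hpt).2
      have hmem : pt.2.toList ∈ PySem.Chars.split₀ line.toList := by
        rw [← PySem.Str.split₀_map_toList]
        exact List.mem_map_of_mem htok
      have hinf : pt.2.toList <:+: line.toList := pvSplit₀_infix _ _ hmem
      have hsub : "passed".toList <:+: pt.2.toList := (PySem.Str.isIn_iff_infix _ _).mp htrue
      exact hl ((PySem.Str.isIn_iff_infix _ _).mpr (hsub.trans hinf))
    have hfil : ((PySem.Str.split₀ line).zip (PySem.Str.split₀ line).tail).filter
        (fun pt => PySem.Str.isIn "passed" pt.2) = [] := by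
      rw [List.filter_eq_nil_iff]
      intro pt hpt
      rw [hnone pt hpt]
      simp
    have hc : pvCand (PySem.Str.split₀ line) = [] := by
      unfold pvCand
      rw [hfil]
      rfl
    rw [hc]
    rfl

-- the whole outer loop equals the first success over the per-line candidates
theorem pvLines_eq (lines : List String) :
    pvAlines lines =
      (((lines.flatMap (fun l => pvCand (PySem.Str.split₀ l))).filterMap id).head?).getD 0 := by
  induction lines with
  | nil => simp [pvAlines]
  | cons l rest ih =>
    rw [pvAlines, List.flatMap_cons, List.filterMap_append, List.head?_append]
    cases hA : pvAline l with
    | some v =>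
      rw [pvLine_eq] at hA
      rw [hA]
      rfl
    | none =>
      rw [pvLine_eq] at hA
      rw [hA]
      simpa using ih

-- -------- bridges String ↔ List Char --------

theorem pvCand_toList (m : List String) : pvCand m = pvCandC (m.map String.toList) := by
  induction m with
  | nil => rfl
  | cons p t ih =>
    cases t with
    | nil => rfl
    | cons q t' =>
      have ih' := ih
      simp only [pvCand, pvCandC, List.map_cons, List.tail_cons, List.zip_cons_cons,
        List.filter_cons] at ih' ⊢
      have hiff : PySem.Str.isIn "passed" q = PySem.Chars.isIn pvP q.toList := by
        simp [PySem.Str.isIn, pvP]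
      rw [hiff] at *
      cases hq : PySem.Chars.isIn pvP q.toList with
      | true => simp only [hq, if_true, List.map_cons]; rw [ih']; rfl
      | false => simp only [hq, if_false, Bool.false_eq_true]; exact ih'

-- -------- pvLinesC vs Python's split('\n') --------

theorem pvLinesC_ne_nil (cs : List Char) : pvLinesC cs ≠ [] := by
  cases cs with
  | nil => simp [pvLinesC]
  | cons c rest =>
    simp only [pvLinesC]
    split
    · simp
    · cases h : pvLinesC rest with
      | nil => exact absurd h (pvLinesC_ne_nil rest)
      | cons a b => simp

theorem pvSplitOnGo_eq (fuel : Nat) : ∀ (l cur : List Char) (acc : List (List Char)),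
    l.length < fuel →
    PySem.Chars.splitOn.go ['\n'] fuel l cur acc
      = acc.reverse ++ (pvLinesC l).modifyHead (cur.reverse ++ ·) := by
  induction fuel with
  | zero => intro l cur acc h; omega
  | succ f ih =>
    intro l cur acc h
    cases l with
    | nil =>
      simp [PySem.Chars.splitOn.go, pvLinesC]
    | cons c rest =>
      by_cases hc : c = '\n'
      · subst hc
        have hpre : List.isPrefixOf ['\n'] ('\n' :: rest) = true := by
          simp [List.isPrefixOf]
        rw [PySem.Chars.splitOn.go, if_pos hpre]
        have : List.drop (List.length ['\n']) ('\n' :: rest) = rest := by simp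
        rw [this, ih rest [] (cur.reverse :: acc) (by simpa using Nat.lt_of_succ_lt_succ h)]
        have hmod : (pvLinesC rest).modifyHead ([].reverse ++ ·) = pvLinesC rest := by
          cases hr : pvLinesC rest with
          | nil => rfl
          | cons a b => simp
        rw [hmod]
        simp [pvLinesC]
      · have hpre : List.isPrefixOf ['\n'] (c :: rest) = false := by
          simp [List.isPrefixOf]
          intro hcontra
          exact absurd hcontra.symm hc
        rw [PySem.Chars.splitOn.go, if_neg (by rw [hpre]; simp)]
        rw [ih rest (c :: cur) acc (by simpa using Nat.lt_of_succ_lt_succ h)]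
        have hL : pvLinesC (c :: rest) = (pvLinesC rest).modifyHead (c :: ·) := by
          simp [pvLinesC, hc]
        rw [hL]
        cases hr : pvLinesC rest with
        | nil => exact absurd hr (pvLinesC_ne_nil rest)
        | cons a b => simp

theorem pvSplitOn_eq (cs : List Char) : PySem.Chars.splitOn cs ['\n'] = pvLinesC cs := by
  rw [PySem.Chars.splitOn, pvSplitOnGo_eq (cs.length + 1) cs [] [] (by omega)]
  cases h : pvLinesC cs with
  | nil => exact absurd h (pvLinesC_ne_nil cs)
  | cons a b => simp

-- -------- split₀.go / pvToks structure --------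

theorem pvGo_acc (l : List Char) : ∀ (cur : List Char) (acc : List (List Char)),
    PySem.Chars.split₀.go l cur acc = acc.reverse ++ PySem.Chars.split₀.go l cur [] := by
  induction l with
  | nil =>
    intro cur acc
    simp only [PySem.Chars.split₀.go]
    split <;> simp
  | cons c rest ih =>
    intro cur acc
    simp only [PySem.Chars.split₀.go]
    split
    · split
      · exact ih [] acc
      · rw [ih [] (cur.reverse :: acc), ih [] [cur.reverse]]
        simp
    · exact ih (c :: cur) acc

theorem pvToks_nil (cur : List Char) : pvToks [] cur = if cur = [] then [] else [cur] := by
  unfold pvToks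
  by_cases hc : cur = []
  · subst hc
    simp [PySem.Chars.split₀.go]
  · have hne : cur.reverse.isEmpty = false := by simp [hc]
    simp [PySem.Chars.split₀.go, hne, hc]

theorem pvToks_cons_space (c : Char) (l cur : List Char) (hs : PySem.Chars.isspace c = true) :
    pvToks (c :: l) cur = if cur = [] then pvToks l [] else cur :: pvToks l [] := by
  unfold pvToks
  by_cases hc : cur = []
  · subst hc
    simp [PySem.Chars.split₀.go, hs]
  · have hne : cur.reverse.isEmpty = false := by simp [hc]
    simp only [PySem.Chars.split₀.go, hs, if_true, hne, Bool.false_eq_true, if_false]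
    rw [pvGo_acc, if_neg hc]
    simp

theorem pvToks_cons_nonspace (c : Char) (l cur : List Char) (hs : PySem.Chars.isspace c = false) :
    pvToks (c :: l) cur = pvToks l (cur ++ [c]) := by
  unfold pvToks
  simp only [PySem.Chars.split₀.go, hs]
  simp

theorem pvToks_zero (l : List Char) : pvToks l [] = PySem.Chars.split₀ l := rfl

-- -------- pvCandC decomposition --------

theorem pvCandC_single (x : List Char) : pvCandC [x] = [] := rfl

theorem pvCandC_cons (x y : List Char) (t : List (List Char)) :
    pvCandC (x :: y :: t)
      = (if PySem.Chars.isIn pvP y then [PySem.Int.ofChars? x] else []) ++ pvCandC (y :: t) := by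
  simp only [pvCandC, List.tail_cons, List.zip_cons_cons, List.filter_cons]
  cases h : PySem.Chars.isIn pvP y with
  | true => simp [h]
  | false => simp [h]

theorem pvCandC_opt (prev : Option (List Char)) (y : List Char) (t : List (List Char)) :
    pvCandC (pvOptL prev ++ y :: t)
      = (match prev with
          | some p => if PySem.Chars.isIn pvP y then [PySem.Int.ofChars? p] else []
          | none => []) ++ pvCandC (y :: t) := by
  cases prev with
  | none => simp [pvOptL]
  | some p => simpa [pvOptL] using pvCandC_cons p y t

-- -------- the main B invariant --------

theorem pvBgo_eq (cs : List Char) : ∀ (prev : Option (List Char)) (cur : List Char),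
    pvBgo (cs ++ ['\n']) prev cur = pvAns (pvLinesC cs) prev cur := by
  induction cs with
  | nil =>
    intro prev cur
    have h0 : pvCandC (pvOptL prev) = [] := by cases prev <;> rfl
    show pvBgo ['\n'] prev cur = _
    rw [pvBgo_cons, if_pos (by decide)]
    by_cases hc : cur = []
    · subst hc
      simp [pvLinesC, pvAns, pvToks_nil, pvBgo, h0]
    · have hcur : cur.isEmpty = false := by simp [hc]
      simp only [hcur, Bool.false_eq_true, if_false, pvLinesC, pvAns, List.flatMap_nil,
        List.append_nil, pvToks_nil, if_neg hc]
      cases prev with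
      | none => simp [pvCandC_opt, pvCandC_single, pvBgo]
      | some p =>
        rw [pvCandC_opt, pvCandC_single, List.append_nil]
        cases hpi : PySem.Chars.isIn pvP cur with
        | false => simp [hpi, pvBgo]
        | true =>
          cases hof : PySem.Int.ofChars? p with
          | some v => simp [hpi, hof]
          | none => simp [hpi, hof, pvBgo]
  | cons c rest ih =>
    intro prev cur
    obtain ⟨L, Ls, hLs⟩ : ∃ L Ls, pvLinesC rest = L :: Ls := by
      cases h : pvLinesC rest with
      | nil => exact absurd h (pvLinesC_ne_nil rest)
      | cons a b => exact ⟨a, b, rfl⟩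
    show pvBgo (c :: (rest ++ ['\n'])) prev cur = _
    rw [pvBgo_cons]
    by_cases hsp : PySem.Chars.isspace c = true
    · rw [if_pos (by simp [PySem.Chars.strIsspace, hsp])]
      by_cases hnl : c = '\n'
      · -- newline: line boundary
        subst hnl
        have hLhead : pvLinesC ('\n' :: rest) = [] :: pvLinesC rest := by simp [pvLinesC]
        rw [hLhead, hLs]
        have hIH := ih none []
        rw [hLs] at hIH
        have hTail : pvAns (L :: Ls) none []
            = (((L :: Ls).flatMap (fun l => pvCandC (PySem.Chars.split₀ l))).filterMap id).head?.getD 0 := by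
          simp only [pvAns, pvOptL, List.nil_append, pvToks_zero, List.flatMap_cons]
        by_cases hc : cur = []
        · subst hc
          have h0 : pvCandC (pvOptL prev ++ pvToks [] []) = [] := by
            rw [pvToks_nil]
            simp only [if_pos rfl, List.append_nil]
            cases prev <;> rfl
          simp only [List.isEmpty_nil, if_true, pvAns, h0, List.nil_append, reduceIte]
          rw [hIH, hTail]
        · have hcur : cur.isEmpty = false := by simp [hc]
          simp only [hcur, Bool.false_eq_true, if_false, pvAns, pvToks_nil, if_neg hc]
          cases prev with
          | none =>
            simp only [reduceIte]
            rw [hIH, hTail, pvCandC_opt, pvCandC_single]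
            rfl
          | some p =>
            rw [pvCandC_opt, pvCandC_single, List.append_nil]
            cases hpi : PySem.Chars.isIn pvP cur with
            | false =>
              simp only [hpi, Bool.false_eq_true, if_false, reduceIte]
              rw [hIH, hTail]
              rfl
            | true =>
              cases hof : PySem.Int.ofChars? p with
              | some v => simp [hpi, hof]
              | none =>
                simp only [hpi, if_true, hof, reduceIte]
                rw [hIH, hTail]
                simp
      · -- in-line whitespace
        have hLhead : pvLinesC (c :: rest) = (pvLinesC rest).modifyHead (c :: ·) := by
          simp [pvLinesC, hnl]
        rw [hLhead, hLs]
        simp only [List.modifyHead]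
        have hTokL : pvToks (c :: L) cur = if cur = [] then pvToks L [] else cur :: pvToks L [] :=
          pvToks_cons_space c L cur hsp
        by_cases hc : cur = []
        · subst hc
          have hIH := ih prev []
          rw [hLs] at hIH
          simp only [List.isEmpty_nil, if_true, if_neg hnl]
          rw [hIH]
          simp only [pvAns, hTokL, reduceIte]
        · have hcur : cur.isEmpty = false := by simp [hc]
          have hIH := ih (some cur) []
          rw [hLs] at hIH
          have hAns : pvAns ((c :: L) :: Ls) prev cur
              = ((pvCandC (pvOptL prev ++ cur :: pvToks L []) ++
                  Ls.flatMap (fun l => pvCandC (PySem.Chars.split₀ l))).filterMap id).head?.getD 0 := by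
            simp only [pvAns, hTokL, if_neg hc]
          have hAns2 : pvAns (L :: Ls) (some cur) []
              = ((pvCandC (cur :: pvToks L []) ++
                  Ls.flatMap (fun l => pvCandC (PySem.Chars.split₀ l))).filterMap id).head?.getD 0 := by
            simp only [pvAns, pvOptL, List.singleton_append]
          rw [hAns, pvCandC_opt]
          simp only [hcur, Bool.false_eq_true, if_false]
          cases prev with
          | none =>
            rw [if_neg hnl, hIH, hAns2]
            rfl
          | some p =>
            cases hpi : PySem.Chars.isIn pvP cur with
            | false =>
              simp only [hpi, Bool.false_eq_true, if_false, if_neg hnl]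
              rw [hIH, hAns2]
              rfl
            | true =>
              cases hof : PySem.Int.ofChars? p with
              | some v => simp [hpi, hof]
              | none =>
                simp only [hpi, if_true, hof, if_neg hnl]
                rw [hIH, hAns2]
                simp
    · -- non-space: extend cur
      have hsp' : PySem.Chars.isspace c = false := eq_false_of_ne_true hsp
      rw [if_neg (by simp [PySem.Chars.strIsspace, hsp'])]
      have hLhead : pvLinesC (c :: rest) = (pvLinesC rest).modifyHead (c :: ·) := by
        have hnl : c ≠ '\n' := by
          intro h; subst h; exact hsp (by decide)
        simp [pvLinesC, hnl]
      rw [hLhead, hLs]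
      simp only [List.modifyHead]
      have hIH := ih prev (cur ++ [c])
      rw [hLs] at hIH
      rw [hIH]
      simp only [pvAns]
      rw [pvToks_cons_nonspace c L cur hsp']

-- -------- assembling both sides --------

theorem pvB_final (cs : List Char) :
    pvBgo (cs ++ ['\n']) none []
      = (((pvLinesC cs).flatMap (fun l => pvCandC (PySem.Chars.split₀ l))).filterMap id).head?.getD 0 := by
  rw [pvBgo_eq cs none []]
  obtain ⟨L, Ls, hLs⟩ : ∃ L Ls, pvLinesC cs = L :: Ls := by
    cases h : pvLinesC cs with
    | nil => exact absurd h (pvLinesC_ne_nil cs)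
    | cons a b => exact ⟨a, b, rfl⟩
  rw [hLs]
  simp only [pvAns, pvOptL, List.nil_append, pvToks_zero, List.flatMap_cons]

-- ===== VERDICT (by name: the statement is the Claim_ definition above) =====
theorem parse_passed_tests_py_spec : Claim_equal_parse_passed_tests_py := by
  intro output _
  unfold Spec_parse_passed_tests_py parse_passed_tests_py parse_passed_tests_py_alt
  -- A side
  have hsplit : (PySem.Str.split? output "\n").getD [] =
      (PySem.Chars.splitOn output.toList ['\n']).map String.ofList := by
    simp [PySem.Str.split?, PySem.Chars.split?]
  rw [hsplit, pvLines_eq, pvSplitOn_eq]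
  -- bridge each line's candidates to the char level
  have hline : ∀ l : List Char, pvCand (PySem.Str.split₀ (String.ofList l))
      = pvCandC (PySem.Chars.split₀ l) := by
    intro l
    rw [pvCand_toList, PySem.Str.split₀_map_toList]
    have : (String.ofList l).toList = l := by simp
    rw [this]
  have hflat : (((pvLinesC output.toList).map String.ofList).flatMap
        (fun l => pvCand (PySem.Str.split₀ l)))
      = (pvLinesC output.toList).flatMap (fun l => pvCandC (PySem.Chars.split₀ l)) := by
    rw [List.flatMap_map]
    exact List.flatMap_congr (fun l _ => hline l)
  rw [hflat, pvB_final]
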